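-- pv_equiv track=rewrite | github.com/Ada1248/Grafy | Project3/functions.py | print_dijkstra
-- ===== SOURCE A (Python) =====
-- def print_dijkstra(d, p, s):
--     result = 'START: s = {}\n'.format(s +1)
--     for i in range(len(d)):
--         a = int(i)
--         way = []
--         while a is not None and a >= 0:
--             way.append(a + 1)
--             a = p[a]
--         way.reverse()
--         result +='d({}) = {} ==> {}\n'.format(i + 1, d[i], way)
--     return result
-- ===== SOURCE B (Python) =====
-- def print_dijkstra(d, p, s):
--     # Memoized path reconstruction: shared predecessor prefixes are built once
--     # (DP over the predecessor forest), lines are joined at the end.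
--     cache = {}
--     lines = ['START: s = {}'.format(s + 1)]
--     for i in range(len(d)):
--         stack = []
--         a = i
--         while a is not None and a >= 0 and a not in cache:
--             stack.append(a)
--             a = p[a]
--         way = [] if a is None or a < 0 else cache[a]
--         while stack:
--             node = stack.pop()
--             way = way + [node + 1]
--             cache[node] = way
--         lines.append('d({}) = {} ==> {}'.format(i + 1, d[i], way))
--     return '\n'.join(lines) + '\n'
-- ===== Notes on version B (the rewrite author's own statement) =====
-- stated objective: alternative
-- what changed: Replaces the per-node while-walk-then-reverse with a memoized DP path builder: each node's root-first path is cached in a dict, walks stop at the first cached node and fill the cache back from an explicit stack, and the output is assembled as a list of lines joined at the end instead of repeated string concatenation.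
import Mathlib
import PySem

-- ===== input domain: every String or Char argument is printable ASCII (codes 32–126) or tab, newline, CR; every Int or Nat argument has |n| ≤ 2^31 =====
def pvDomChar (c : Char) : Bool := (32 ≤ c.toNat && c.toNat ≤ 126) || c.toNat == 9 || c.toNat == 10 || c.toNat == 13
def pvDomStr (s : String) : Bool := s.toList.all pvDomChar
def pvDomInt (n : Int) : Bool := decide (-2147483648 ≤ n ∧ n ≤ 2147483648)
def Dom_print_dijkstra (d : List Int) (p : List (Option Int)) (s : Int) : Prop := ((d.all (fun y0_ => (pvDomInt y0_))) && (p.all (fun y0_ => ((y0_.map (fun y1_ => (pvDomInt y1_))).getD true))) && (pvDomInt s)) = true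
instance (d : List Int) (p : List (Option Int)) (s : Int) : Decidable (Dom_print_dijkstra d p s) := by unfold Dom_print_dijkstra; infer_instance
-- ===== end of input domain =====

-- B replaces A's per-node while-walk-then-reverse by a memoized (dict-cached) DP path
-- builder with an explicit stack, assembling the lines with a final join (alternative
-- decomposition, same cost).

-- shared formatting helper: the line 'd({i+1}) = {d[i]} ==> {way}' (without the newline);
-- both Pythons produce it with the identical .format / str(list) call
def pvLine (d : List Int) (i : Nat) (way : List Int) : String :=
  "d(" ++ PySem.Int.toStr ((i : Int) + 1) ++ ") = " ++
    PySem.Int.toStr (PySem.List.pyGetD d (i : Int) 0) ++ " ==> [" ++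
    PySem.Str.join ", " (way.map PySem.Int.toStr) ++ "]"

-- ===== PORT A =====
-- the 'while a is not None and a >= 0: way.append(a+1); a = p[a]' loop; fuel makes it
-- total (Pre_ guarantees the chain ends well inside p.length + 2 steps); on IndexError
-- (pyGet? = none, excluded by Pre_) it bails out with the current accumulator
def pvWalkA (p : List (Option Int)) : Nat → Option Int → List Int → List Int
  | 0, _, way => way
  | fuel + 1, a, way =>
    match a with
    | none => way
    | some x =>
      if x < 0 then way
      else
        match PySem.List.pyGet? p x with
        | some nx => pvWalkA p fuel nx (way ++ [x + 1])
        | none => way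

def print_dijkstra (d : List Int) (p : List (Option Int)) (s : Int) : String :=
  (List.range d.length).foldl
    (fun result (i : Nat) =>
      let way := (pvWalkA p (p.length + 2) (some (i : Int)) []).reverse
      result ++ pvLine d i way ++ "\n")
    ("START: s = " ++ PySem.Int.toStr (s + 1) ++ "\n")

-- ===== PORT B =====
-- first inner while of B: walk up the predecessor chain pushing uncached nodes onto the
-- stack; returns (stack, stopping point); same fuel/IndexError convention as pvWalkA
def pvCollect (p : List (Option Int)) (cache : PySem.Dict Int (List Int)) :
    Nat → Option Int → List Int → List Int × Option Int
  | 0, a, st => (st, a)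
  | fuel + 1, a, st =>
    match a with
    | none => (st, none)
    | some x =>
      if x < 0 then (st, some x)
      else
        match cache.get? x with
        | some _ => (st, some x)
        | none =>
          match PySem.List.pyGet? p x with
          | some nx => pvCollect p cache fuel nx (st ++ [x])
          | none => (st, some x)

-- 'way = [] if a is None or a < 0 else cache[a]' (KeyError cannot happen after the while)
def pvBase (cache : PySem.Dict Int (List Int)) (a : Option Int) : List Int :=
  match a with
  | none => []
  | some x => if x < 0 then [] else (cache.get? x).getD []

-- second inner while: pop the stack (we recurse over the reversed stack, head = last
-- pushed), extend the way and cache it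
def pvFill : PySem.Dict Int (List Int) → List Int → List Int →
    List Int × PySem.Dict Int (List Int)
  | cache, [], way => (way, cache)
  | cache, k :: rest, way => pvFill (cache.insert k (way ++ [k + 1])) rest (way ++ [k + 1])

-- one iteration of B's for-loop: (lines, cache) ↦ (lines + [new line], updated cache)
def pvStepB (d : List Int) (p : List (Option Int))
    (acc : List String × PySem.Dict Int (List Int)) (i : Nat) :
    List String × PySem.Dict Int (List Int) :=
  let r := pvCollect p acc.2 (p.length + 2) (some (i : Int)) []
  let fw := pvFill acc.2 r.1.reverse (pvBase acc.2 r.2)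
  (acc.1 ++ [pvLine d i fw.1], fw.2)

def print_dijkstra_alt (d : List Int) (p : List (Option Int)) (s : Int) : String :=
  let r := (List.range d.length).foldl (pvStepB d p)
    (["START: s = " ++ PySem.Int.toStr (s + 1)], PySem.Dict.empty)
  PySem.Str.join "\n" r.1 ++ "\n"

-- ===== PRECONDITION & SPEC =====
-- one step of the predecessor walk: stop (none) past a None or negative predecessor;
-- a node whose index is out of range for p (Python: IndexError) is a fixed point, so
-- the iterate below never reaches none through it
def pvStep (p : List (Option Int)) (a : Option Int) : Option Int :=
  match a with
  | none => none
  | some x =>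
    if x < 0 then none
    else
      match PySem.List.pyGet? p x with
      | some nx => nx
      | none => some x

-- Pre_: from every node i < len d the predecessor chain terminates (reaches None or a
-- negative predecessor, never an out-of-range index). This is exactly where A returns:
-- otherwise A raises IndexError or loops forever. A terminating chain visits distinct
-- nodes, so p.length + 2 iterations always suffice.
def Pre_print_dijkstra (d : List Int) (p : List (Option Int)) (s : Int) : Prop :=
  ∀ i ∈ List.range d.length, (pvStep p)^[p.length + 2] (some (i : Int)) = none

instance (d : List Int) (p : List (Option Int)) (s : Int) :
    Decidable (Pre_print_dijkstra d p s) := by unfold Pre_print_dijkstra; infer_instance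

def pvWitness_print_dijkstra : List Int × List (Option Int) × Int := ([3, 7], [none, some 0], 1)

def Spec_print_dijkstra (d : List Int) (p : List (Option Int)) (s : Int) (out : String) : Prop := out = print_dijkstra_alt d p s
instance (d : List Int) (p : List (Option Int)) (s : Int) (out : String) : Decidable (Spec_print_dijkstra d p s out) := by unfold Spec_print_dijkstra; infer_instance

-- ===== CLAIM (what is proved, stated in full; the proofs are below) =====
def Claim_equal_print_dijkstra : Prop := ∀ (d : List Int) (p : List (Option Int)) (s : Int), Dom_print_dijkstra d p s → Pre_print_dijkstra d p s → Spec_print_dijkstra d p s (print_dijkstra d p s)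

-- ===== LEMMAS AND PROOFS =====

-- the root-first path of a node, as A computes it (with the canonical fuel)
def pvSpec (p : List (Option Int)) (a : Option Int) : List Int :=
  (pvWalkA p (p.length + 2) a []).reverse

-- chain termination with the canonical fuel
def pvTerm (p : List (Option Int)) (a : Option Int) : Prop :=
  (pvStep p)^[p.length + 2] a = none

-- cache invariant: every cached entry is a terminating node with its correct path
def pvInv (p : List (Option Int)) (cache : PySem.Dict Int (List Int)) : Prop :=
  ∀ k v, cache.get? k = some v → pvTerm p (some k) ∧ v = pvSpec p (some k)

-- reversed uncached segment: [deepest, …, shallowest] walking back up from the stop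
-- point t to the start a; every listed node terminates
inductive pvRSeg (p : List (Option Int)) : Option Int → List Int → Option Int → Prop
  | nil (t : Option Int) : pvRSeg p t [] t
  | cons (t : Option Int) (k : Int) (rest : List Int) (a : Option Int) :
      0 ≤ k → pvTerm p (some k) → pvStep p (some k) = t →
      pvRSeg p (some k) rest a → pvRSeg p t (k :: rest) a

theorem pvStr_assoc (a b c : String) : (a ++ b) ++ c = a ++ (b ++ c) := by
  apply String.toList_inj.mp; simp

theorem pvWalkA_none (p : List (Option Int)) (f : Nat) : pvWalkA p f none [] = [] := by
  cases f <;> simp [pvWalkA]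

theorem pvWalkA_neg (p : List (Option Int)) (f : Nat) {x : Int} (hx : x < 0) :
    pvWalkA p f (some x) [] = [] := by
  cases f <;> simp [pvWalkA, hx]

theorem pvWalkA_cons (p : List (Option Int)) (f : Nat) {x : Int} (nx : Option Int)
    (hx : ¬ x < 0) (hgx : PySem.List.pyGet? p x = some nx) (w : List Int) :
    pvWalkA p (f + 1) (some x) w = pvWalkA p f nx (w ++ [x + 1]) := by
  simp only [pvWalkA, hx, if_false, hgx]

theorem pvWalkA_append (p : List (Option Int)) :
    ∀ (fuel : Nat) (a : Option Int) (w : List Int),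
      pvWalkA p fuel a w = w ++ pvWalkA p fuel a [] := by
  intro fuel
  induction fuel with
  | zero => intro a w; simp [pvWalkA]
  | succ f ih =>
    intro a w
    cases a with
    | none => simp [pvWalkA]
    | some x =>
      by_cases hx : x < 0
      · simp [pvWalkA, hx]
      · cases hg : PySem.List.pyGet? p x with
        | none => simp [pvWalkA, hx, hg]
        | some nx =>
          simp only [pvWalkA, hx, if_false, hg]
          rw [ih nx (w ++ [x + 1]), ih nx ([] ++ [x + 1])]
          simp

theorem pvIterate_none_mono (p : List (Option Int)) {m n : Nat} {a : Option Int}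
    (h : (pvStep p)^[m] a = none) (hmn : m ≤ n) : (pvStep p)^[n] a = none := by
  obtain ⟨j, rfl⟩ : ∃ j, n = j + m := ⟨n - m, by omega⟩
  rw [Function.iterate_add_apply, h]
  exact Function.iterate_fixed rfl j

theorem pvWalkA_stable (p : List (Option Int)) :
    ∀ (k f g : Nat) (a : Option Int), (pvStep p)^[k] a = none → k ≤ f → k ≤ g →
      pvWalkA p f a [] = pvWalkA p g a [] := by
  intro k
  induction k with
  | zero =>
    intro f g a h _ _
    simp only [Function.iterate_zero, id] at h
    subst h
    rw [pvWalkA_none, pvWalkA_none]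
  | succ k ih =>
    intro f g a h hf hg
    cases a with
    | none => rw [pvWalkA_none, pvWalkA_none]
    | some x =>
      by_cases hx : x < 0
      · rw [pvWalkA_neg p f hx, pvWalkA_neg p g hx]
      · cases hgx : PySem.List.pyGet? p x with
        | none =>
          exfalso
          have hfix : pvStep p (some x) = some x := by simp [pvStep, hx, hgx]
          rw [Function.iterate_fixed hfix] at h
          simp at h
        | some nx =>
          have hstep : pvStep p (some x) = nx := by simp [pvStep, hx, hgx]
          have h' : (pvStep p)^[k] nx = none := by
            rw [Function.iterate_succ_apply, hstep] at h; exact h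
          obtain ⟨f', rfl⟩ : ∃ f', f = f' + 1 := ⟨f - 1, by omega⟩
          obtain ⟨g', rfl⟩ : ∃ g', g = g' + 1 := ⟨g - 1, by omega⟩
          simp only [pvWalkA, hx, if_false, hgx]
          rw [pvWalkA_append p f', pvWalkA_append p g', ih f' g' nx h' (by omega) (by omega)]

theorem pvSpec_none (p : List (Option Int)) : pvSpec p none = [] := by
  simp [pvSpec, pvWalkA_none]

theorem pvSpec_neg (p : List (Option Int)) {x : Int} (hx : x < 0) :
    pvSpec p (some x) = [] := by
  simp [pvSpec, pvWalkA_neg p _ hx]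

theorem pvSpec_unfold (p : List (Option Int)) (x : Int) (hx : 0 ≤ x)
    (ht : pvTerm p (some x)) :
    pvSpec p (some x) = pvSpec p (pvStep p (some x)) ++ [x + 1] := by
  have hx' : ¬ x < 0 := by omega
  cases hgx : PySem.List.pyGet? p x with
  | none =>
    exfalso
    have hfix : pvStep p (some x) = some x := by simp [pvStep, hx', hgx]
    unfold pvTerm at ht
    rw [Function.iterate_fixed hfix] at ht
    simp at ht
  | some nx =>
    have hstep : pvStep p (some x) = nx := by simp [pvStep, hx', hgx]
    have h' : (pvStep p)^[p.length + 1] nx = none := by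
      unfold pvTerm at ht
      rw [show p.length + 2 = (p.length + 1) + 1 from rfl, Function.iterate_succ_apply,
        hstep] at ht
      exact ht
    rw [hstep]
    unfold pvSpec
    rw [show p.length + 2 = (p.length + 1) + 1 from rfl]
    rw [pvWalkA_cons p (p.length + 1) nx hx' hgx []]
    rw [pvWalkA_append p (p.length + 1) nx ([] ++ [x + 1]),
      pvWalkA_stable p (p.length + 1) (p.length + 1) ((p.length + 1) + 1) nx h' le_rfl
        (by omega)]
    simp

theorem pvRSeg_snoc (p : List (Option Int)) {t b : Option Int} {m : List Int} {x : Int}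
    (h : pvRSeg p t m b) (hx : 0 ≤ x) (hterm : pvTerm p (some x))
    (hstep : pvStep p (some x) = b) : pvRSeg p t (m ++ [x]) (some x) := by
  induction h with
  | nil t => exact pvRSeg.cons t x [] (some x) hx hterm hstep (pvRSeg.nil (some x))
  | cons t k rest a hk hkt hks _ ih =>
    exact pvRSeg.cons t k (rest ++ [x]) (some x) hk hkt hks (ih hstep)

theorem pvCollect_none (p : List (Option Int)) (cache : PySem.Dict Int (List Int))
    (fuel : Nat) (st : List Int) : pvCollect p cache fuel none st = (st, none) := by
  cases fuel <;> simp [pvCollect]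

theorem pvCollect_spec (p : List (Option Int)) (cache : PySem.Dict Int (List Int))
    (hinv : pvInv p cache) :
    ∀ (k fuel : Nat) (a : Option Int) (st : List Int),
      (pvStep p)^[k] a = none → k ≤ fuel → k ≤ p.length + 2 →
      ∃ l t, pvCollect p cache fuel a st = (st ++ l, t) ∧ pvRSeg p t l.reverse a ∧
        pvBase cache t = pvSpec p t := by
  intro k
  induction k with
  | zero =>
    intro fuel a st h _ _
    simp only [Function.iterate_zero, id] at h
    subst h
    exact ⟨[], none, by simp [pvCollect_none], pvRSeg.nil none,
      by simp [pvBase, pvSpec_none]⟩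
  | succ k ih =>
    intro fuel a st h hf hk2
    cases a with
    | none =>
      exact ⟨[], none, by simp [pvCollect_none], pvRSeg.nil none,
        by simp [pvBase, pvSpec_none]⟩
    | some x =>
      obtain ⟨f, rfl⟩ : ∃ f, fuel = f + 1 := ⟨fuel - 1, by omega⟩
      by_cases hx : x < 0
      · exact ⟨[], some x, by simp [pvCollect, hx], pvRSeg.nil (some x),
          by simp [pvBase, hx, pvSpec_neg p hx]⟩
      · cases hc : cache.get? x with
        | some v =>
          refine ⟨[], some x, by simp [pvCollect, hx, hc], pvRSeg.nil (some x), ?_⟩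
          simp [pvBase, hx, hc, (hinv x v hc).2]
        | none =>
          cases hgx : PySem.List.pyGet? p x with
          | none =>
            exfalso
            have hfix : pvStep p (some x) = some x := by simp [pvStep, hx, hgx]
            rw [Function.iterate_fixed hfix] at h
            simp at h
          | some nx =>
            have hstep : pvStep p (some x) = nx := by simp [pvStep, hx, hgx]
            have h' : (pvStep p)^[k] nx = none := by
              rw [Function.iterate_succ_apply, hstep] at h; exact h
            obtain ⟨l', t, heq, hrs, hbase⟩ :=
              ih f nx (st ++ [x]) h' (by omega) (by omega)
            refine ⟨x :: l', t, ?_, ?_, hbase⟩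
            · simp only [pvCollect, hx, if_false, hc, hgx]
              rw [heq]
              simp
            · have hterm : pvTerm p (some x) :=
                pvIterate_none_mono p h (by omega)
              simpa using pvRSeg_snoc p hrs (by omega) hterm hstep
  
theorem pvFill_spec (p : List (Option Int)) :
    ∀ (l : List Int) (t a : Option Int) (way : List Int)
      (cache : PySem.Dict Int (List Int)), pvInv p cache → pvRSeg p t l a →
      way = pvSpec p t →
      (pvFill cache l way).1 = pvSpec p a ∧ pvInv p (pvFill cache l way).2 := by
  intro l t a way cache hinv hr hw
  induction hr generalizing way cache with
  | nil t => exact ⟨hw, hinv⟩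
  | cons t k rest a hk hkt hks _ ih =>
    have hway : way ++ [k + 1] = pvSpec p (some k) := by
      rw [hw, ← hks, ← pvSpec_unfold p k hk hkt]
    simp only [pvFill]
    apply ih
    · intro j v hj
      rw [PySem.Dict.get?_insert] at hj
      by_cases hjk : j = k
      · subst hjk
        rw [if_pos rfl] at hj
        refine ⟨hkt, ?_⟩
        rw [← Option.some_inj.mp hj]
        exact hway
      · rw [if_neg hjk] at hj
        exact hinv j v hj
    · exact hway

theorem pvFold_B (d : List Int) (p : List (Option Int)) (L0 : List String) :
    ∀ (n : Nat), n ≤ d.length →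
      (∀ i ∈ List.range d.length, (pvStep p)^[p.length + 2] (some (i : Int)) = none) →
      ∃ c, (List.range n).foldl (pvStepB d p) (L0, PySem.Dict.empty) =
            (L0 ++ (List.range n).map (fun i => pvLine d i (pvSpec p (some (i : Int)))), c) ∧
        pvInv p c := by
  intro n
  induction n with
  | zero =>
    intro _ _
    refine ⟨PySem.Dict.empty, by simp, ?_⟩
    intro k v hk
    rw [PySem.Dict.get?_empty] at hk
    simp at hk
  | succ n ih =>
    intro hn hpre
    obtain ⟨c, hc, hinv⟩ := ih (by omega) hpre
    have hterm : (pvStep p)^[p.length + 2] (some (n : Int)) = none :=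
      hpre n (List.mem_range.mpr (by omega))
    obtain ⟨l, t, hcol, hrs, hbase⟩ :=
      pvCollect_spec p c hinv (p.length + 2) (p.length + 2) (some (n : Int)) []
        hterm le_rfl le_rfl
    obtain ⟨hfill1, hfill2⟩ :=
      pvFill_spec p l.reverse t (some (n : Int)) (pvBase c t) c hinv hrs hbase
    refine ⟨(pvFill c l.reverse (pvBase c t)).2, ?_, hfill2⟩
    rw [List.range_succ, List.foldl_append, hc]
    simp only [List.foldl_cons, List.foldl_nil, pvStepB]
    rw [hcol]
    simp only [List.nil_append]
    rw [hfill1]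
    simp [List.map_append, List.append_assoc]

theorem pvJoin_fold :
    ∀ (L : List String) (c : String),
      L.foldl (fun r x => r ++ x ++ "\n") (c ++ "\n") =
        PySem.Str.join "\n" (c :: L) ++ "\n" := by
  intro L
  induction L with
  | nil =>
    intro c
    apply String.toList_inj.mp
    simp [PySem.Str.toList_join, PySem.Chars.join_singleton]
  | cons x L ih =>
    intro c
    have h1 : (c ++ "\n") ++ x ++ "\n" = ((c ++ "\n") ++ x) ++ "\n" := by
      rw [pvStr_assoc]
    simp only [List.foldl_cons]
    rw [h1, ih ((c ++ "\n") ++ x)]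
    congr 1
    apply String.toList_inj.mp
    cases L with
    | nil =>
      simp [PySem.Str.toList_join, PySem.Chars.join_singleton,
        PySem.Chars.join_cons_cons]
    | cons y L' =>
      simp [PySem.Str.toList_join, PySem.Chars.join_cons_cons]

-- ===== VERDICT (by name: the statement is the Claim_ definition above) =====
theorem print_dijkstra_spec : Claim_equal_print_dijkstra := by
  intro d p s _ hpre
  unfold Spec_print_dijkstra
  obtain ⟨c, hB, -⟩ :=
    pvFold_B d p ["START: s = " ++ PySem.Int.toStr (s + 1)] d.length le_rfl hpre
  have hBval : print_dijkstra_alt d p s =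
      PySem.Str.join "\n"
        (("START: s = " ++ PySem.Int.toStr (s + 1)) ::
          (List.range d.length).map (fun i => pvLine d i (pvSpec p (some (i : Int))))) ++
        "\n" := by
    unfold print_dijkstra_alt
    rw [hB]
    rfl
  rw [hBval]
  unfold print_dijkstra
  have hA : (fun (result : String) (i : Nat) =>
      let way := (pvWalkA p (p.length + 2) (some (i : Int)) []).reverse
      result ++ pvLine d i way ++ "\n") =
      fun (result : String) (i : Nat) =>
        result ++ pvLine d i (pvSpec p (some (i : Int))) ++ "\n" := rfl
  rw [hA]
  rw [← List.foldl_map (f := fun i : Nat => pvLine d i (pvSpec p (some (i : Int))))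
    (g := fun (r x : String) => r ++ x ++ "\n")]
  exact pvJoin_fold _ _
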